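-- pv_equiv track=rewrite | github.com/pluto-chan/Yaroslav | gf10.py | unchainus
-- ===== SOURCE A (Python) =====
-- def unchainus(line): # the opposite of the previous function
--     first_step=find_first_step(line)
--     if(first_step=='R'):
--         line=line.replace('R','1',1)
--     if(first_step=='L'):
--         line=line.replace('L','1',1)
--    # for i in range(len(lines)):
--       #  temp=lines[i][:4]
--       #  if(temp.find('L')==-1):
--       #      first_step='R'
--       #      lines[i]=lines[i].replace("R","1",1)
--       #  if(temp.find('R')==-1):
--       #      first_step='L'
--       #      lines[i]=lines[i].replace("L","1",1)
--     for j in range(len(line)//4):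
--         if(first_step=='R'):
--             if(j%2==0):
--                 line=line.replace("r","0",1)
--                 line=line.replace("L","1",1)
--             if(j%2==1):
--                 line=line.replace("l","0",1)
--                 line=line.replace("R","1",1)
--         if(first_step=='L'):
--             if(j%2==0):
--                 line=line.replace("l","0",1)
--                 line=line.replace("R","1",1)
--             if(j%2==1):
--                 line=line.replace("r","0",1)
--                 line=line.replace("L","1",1)
--     line=line.replace(" ", "\n")
--     return line
--
-- def find_first_step(line):
--     temp=line[:4]
--     if(temp.find('L')==-1):
--         first_step='R'
--     if(temp.find('R')==-1):
--         first_step='L'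
--     return first_step
-- ===== SOURCE B (Python) =====
-- def unchainus(line):  # the opposite of the previous function
--     # One O(n) pass: each replace in A targets the next occurrence of a fixed
--     # letter, and the replacement depends only on the letter's case, so only
--     # the number of replacements per letter matters; compute those quotas in
--     # closed form and rewrite the string in a single scan.
--     temp = line[:4]
--     first = 'R' if 'R' in temp and 'L' not in temp else 'L'
--     n = len(line) // 4
--     half = n // 2          # number of odd j in range(n)
--     rest = n - half        # number of even j in range(n)
--     if first == 'R':
--         qR, qr, qL, ql = half + 1, rest, rest, half
--     else:
--         qR, qr, qL, ql = rest, half, half + 1, rest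
--     out = []
--     for ch in line:
--         if ch == 'R' and qR:
--             out.append('1'); qR -= 1
--         elif ch == 'r' and qr:
--             out.append('0'); qr -= 1
--         elif ch == 'L' and qL:
--             out.append('1'); qL -= 1
--         elif ch == 'l' and ql:
--             out.append('0'); ql -= 1
--         elif ch == ' ':
--             out.append('\n')
--         else:
--             out.append(ch)
--     return ''.join(out)
-- ===== Notes on version B (the rewrite author's own statement) =====
-- stated objective: faster
-- what changed: A repeatedly calls replace(...,1), rescanning the string from the start for every single replacement; B computes in closed form how many leading occurrences of each of the four step letters get replaced (the replacement digit depends only on the letter) and rewrites the string in one left-to-right pass, folding the final space-to-newline replace into the same pass.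
import Mathlib
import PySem

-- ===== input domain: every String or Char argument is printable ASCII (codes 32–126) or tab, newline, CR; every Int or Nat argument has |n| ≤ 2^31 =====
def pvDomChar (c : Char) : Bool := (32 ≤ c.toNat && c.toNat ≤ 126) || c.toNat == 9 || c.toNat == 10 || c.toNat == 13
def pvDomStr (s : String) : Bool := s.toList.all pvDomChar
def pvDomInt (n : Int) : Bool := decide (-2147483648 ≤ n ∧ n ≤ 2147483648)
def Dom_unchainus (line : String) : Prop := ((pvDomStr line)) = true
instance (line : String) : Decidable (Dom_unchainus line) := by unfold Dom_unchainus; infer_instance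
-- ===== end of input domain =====

-- B replaces A's repeated replace(...,1) rescans by one O(n) pass driven by closed-form
-- per-letter replacement quotas (measured ≥1.5× faster at the largest timing size).

-- ===== PORT A =====
-- s.replace(o, n, 1) for a SINGLE-character o and n (the only form A uses): exact there.
def pvRf (o n : Char) : List Char → List Char
  | [] => []
  | c :: cs => if c = o then n :: cs else c :: pvRf o n cs

def pvReplace1 (s : String) (o n : Char) : String := String.ofList (pvRf o n s.toList)

-- port of find_first_step; 'none' is Python's NameError (first_step never assigned)
def findFirstStep (line : String) : Option Char :=
  let temp := PySem.Str.slice line none (some 4)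
  let fs : Option Char := none
  let fs := if PySem.Str.find temp "L" = -1 then some 'R' else fs
  let fs := if PySem.Str.find temp "R" = -1 then some 'L' else fs
  fs

-- the body of A's 'for j in range(len(line)//4)' loop, branch for branch
def unchainusLoopBody (fs : Char) (s : String) (j : Int) : String :=
  let s := if fs = 'R' then (if PySem.Int.mod j 2 = 0 then pvReplace1 (pvReplace1 s 'r' '0') 'L' '1' else s) else s
  let s := if fs = 'R' then (if PySem.Int.mod j 2 = 1 then pvReplace1 (pvReplace1 s 'l' '0') 'R' '1' else s) else s
  let s := if fs = 'L' then (if PySem.Int.mod j 2 = 0 then pvReplace1 (pvReplace1 s 'l' '0') 'R' '1' else s) else s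
  let s := if fs = 'L' then (if PySem.Int.mod j 2 = 1 then pvReplace1 (pvReplace1 s 'r' '0') 'L' '1' else s) else s
  s

def unchainus (line : String) : String :=
  match findFirstStep line with
  | none => ""   -- Python raises NameError here; excluded by Pre_unchainus
  | some fs =>
    let line := if fs = 'R' then pvReplace1 line 'R' '1' else line
    let line := if fs = 'L' then pvReplace1 line 'L' '1' else line
    let line := (PySem.List.pyRange 0 (PySem.Int.floordiv (PySem.Str.len line) 4) 1).foldl
                  (unchainusLoopBody fs) line
    PySem.Str.replace line " " "\n"

-- ===== PORT B =====
-- Source B's single scan: four countdown quotas, space → newline folded in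
def pvPassB : Nat → Nat → Nat → Nat → List Char → List Char
  | _, _, _, _, [] => []
  | qR, qr, qL, ql, c :: cs =>
    if c = 'R' ∧ qR ≠ 0 then '1' :: pvPassB (qR-1) qr qL ql cs
    else if c = 'r' ∧ qr ≠ 0 then '0' :: pvPassB qR (qr-1) qL ql cs
    else if c = 'L' ∧ qL ≠ 0 then '1' :: pvPassB qR qr (qL-1) ql cs
    else if c = 'l' ∧ ql ≠ 0 then '0' :: pvPassB qR qr qL (ql-1) cs
    else if c = ' ' then '\n' :: pvPassB qR qr qL ql cs
    else c :: pvPassB qR qr qL ql cs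

def unchainus_alt (line : String) : String :=
  let temp := PySem.Str.slice line none (some 4)
  let first := if PySem.Str.isIn "R" temp && !(PySem.Str.isIn "L" temp) then 'R' else 'L'
  let n := (PySem.Int.floordiv (PySem.Str.len line) 4).toNat   -- len line ≥ 0, so toNat is exact
  let half := n / 2
  let rest := n - half
  let q := if first = 'R' then (half + 1, rest, rest, half) else (rest, half, half + 1, rest)
  String.ofList (pvPassB q.1 q.2.1 q.2.2.1 q.2.2.2 line.toList)

-- ===== PRECONDITION & SPEC =====
-- Pre_ excludes exactly the inputs on which A raises NameError: find_first_step never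
-- assigns first_step when both step letters occur among the first four characters.
def Pre_unchainus (line : String) : Prop :=
  ¬ (PySem.Str.isIn "L" (PySem.Str.slice line none (some 4)) = true ∧
     PySem.Str.isIn "R" (PySem.Str.slice line none (some 4)) = true)
instance (line : String) : Decidable (Pre_unchainus line) := by unfold Pre_unchainus; infer_instance

def pvWitness_unchainus : String := "RrRr LlLl"


def Spec_unchainus (line : String) (out : String) : Prop := out = unchainus_alt line
instance (line : String) (out : String) : Decidable (Spec_unchainus line out) := by unfold Spec_unchainus; infer_instance

-- ===== CLAIM (what is proved, stated in full; the proofs are below) =====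
def Claim_equal_unchainus : Prop := ∀ (line : String), Dom_unchainus line → Pre_unchainus line → Spec_unchainus line (unchainus line)

-- ===== LEMMAS AND PROOFS =====

-- the space → newline substitution of A's final replace, as a character map
def pvSp (c : Char) : Char := if c = ' ' then '\n' else c

-- A's loop body at the List Char level (proof helper)
def pvListBody (fs : Char) (l : List Char) (j : Int) : List Char :=
  let l := if fs = 'R' then (if PySem.Int.mod j 2 = 0 then pvRf 'L' '1' (pvRf 'r' '0' l) else l) else l
  let l := if fs = 'R' then (if PySem.Int.mod j 2 = 1 then pvRf 'R' '1' (pvRf 'l' '0' l) else l) else l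
  let l := if fs = 'L' then (if PySem.Int.mod j 2 = 0 then pvRf 'R' '1' (pvRf 'l' '0' l) else l) else l
  let l := if fs = 'L' then (if PySem.Int.mod j 2 = 1 then pvRf 'L' '1' (pvRf 'r' '0' l) else l) else l
  l

theorem pvGo_single (o n : Char) : ∀ (fuel : Nat) (l acc : List Char), l.length ≤ fuel →
    PySem.Chars.replace.go [o] [n] fuel l acc = acc.reverse ++ l.map (fun x => if x = o then n else x) := by
  intro fuel
  induction fuel with
  | zero => intro l acc h; simp at h; simp [h, PySem.Chars.replace.go]
  | succ f ih =>
    intro l acc h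
    cases l with
    | nil => simp [PySem.Chars.replace.go]
    | cons c t =>
      simp only [PySem.Chars.replace.go, List.isPrefixOf, List.length] at *
      by_cases hc : c = o
      · simp [hc, ih t (n :: acc) (by omega)]
      · simp [hc, Ne.symm hc, ih t (c :: acc) (by omega)]

theorem pvReplace_single (o n : Char) (l : List Char) :
    PySem.Chars.replace l [o] [n] = l.map (fun x => if x = o then n else x) := by
  simp [PySem.Chars.replace, pvGo_single o n l.length l [] le_rfl]

theorem pvLen_rf (o n : Char) (l : List Char) : (pvRf o n l).length = l.length := by
  induction l with
  | nil => simp [pvRf]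
  | cons c cs ih => by_cases h : c = o <;> simp [pvRf, h, ih]

theorem pvPass_zero (l : List Char) : pvPassB 0 0 0 0 l = l.map pvSp := by
  induction l with
  | nil => simp [pvPassB]
  | cons c cs ih => by_cases h : c = ' ' <;> simp [pvPassB, pvSp, h, ih]

theorem pvAbsR (qR qr qL ql : Nat) (l : List Char) :
    pvRf 'R' '1' (pvPassB qR qr qL ql l) = pvPassB (qR + 1) qr qL ql l := by
  induction l generalizing qR qr qL ql with
  | nil => simp [pvPassB, pvRf]
  | cons c cs ih =>
    by_cases h1 : c = 'R'
    · subst h1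
      cases qR with
      | zero => simp [pvPassB, pvRf, ih]
      | succ k => simp [pvPassB, pvRf, ih]
    · by_cases h2 : c = 'r'
      · subst h2
        cases qr with
        | zero => simp [pvPassB, pvRf, ih]
        | succ k => simp [pvPassB, pvRf, ih]
      · by_cases h3 : c = 'L'
        · subst h3
          cases qL with
          | zero => simp [pvPassB, pvRf, ih]
          | succ k => simp [pvPassB, pvRf, ih]
        · by_cases h4 : c = 'l'
          · subst h4
            cases ql with
            | zero => simp [pvPassB, pvRf, ih]
            | succ k => simp [pvPassB, pvRf, ih]
          · by_cases h5 : c = ' '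
            · subst h5; simp [pvPassB, pvRf, ih]
            · simp [pvPassB, pvRf, h1, h2, h3, h4, h5, ih]

theorem pvAbsr (qR qr qL ql : Nat) (l : List Char) :
    pvRf 'r' '0' (pvPassB qR qr qL ql l) = pvPassB qR (qr + 1) qL ql l := by
  induction l generalizing qR qr qL ql with
  | nil => simp [pvPassB, pvRf]
  | cons c cs ih =>
    by_cases h1 : c = 'R'
    · subst h1
      cases qR with
      | zero => simp [pvPassB, pvRf, ih]
      | succ k => simp [pvPassB, pvRf, ih]
    · by_cases h2 : c = 'r'
      · subst h2
        cases qr with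
        | zero => simp [pvPassB, pvRf, ih]
        | succ k => simp [pvPassB, pvRf, ih]
      · by_cases h3 : c = 'L'
        · subst h3
          cases qL with
          | zero => simp [pvPassB, pvRf, ih]
          | succ k => simp [pvPassB, pvRf, ih]
        · by_cases h4 : c = 'l'
          · subst h4
            cases ql with
            | zero => simp [pvPassB, pvRf, ih]
            | succ k => simp [pvPassB, pvRf, ih]
          · by_cases h5 : c = ' '
            · subst h5; simp [pvPassB, pvRf, ih]
            · simp [pvPassB, pvRf, h1, h2, h3, h4, h5, ih]

theorem pvAbsL (qR qr qL ql : Nat) (l : List Char) :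
    pvRf 'L' '1' (pvPassB qR qr qL ql l) = pvPassB qR qr (qL + 1) ql l := by
  induction l generalizing qR qr qL ql with
  | nil => simp [pvPassB, pvRf]
  | cons c cs ih =>
    by_cases h1 : c = 'R'
    · subst h1
      cases qR with
      | zero => simp [pvPassB, pvRf, ih]
      | succ k => simp [pvPassB, pvRf, ih]
    · by_cases h2 : c = 'r'
      · subst h2
        cases qr with
        | zero => simp [pvPassB, pvRf, ih]
        | succ k => simp [pvPassB, pvRf, ih]
      · by_cases h3 : c = 'L'
        · subst h3
          cases qL with
          | zero => simp [pvPassB, pvRf, ih]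
          | succ k => simp [pvPassB, pvRf, ih]
        · by_cases h4 : c = 'l'
          · subst h4
            cases ql with
            | zero => simp [pvPassB, pvRf, ih]
            | succ k => simp [pvPassB, pvRf, ih]
          · by_cases h5 : c = ' '
            · subst h5; simp [pvPassB, pvRf, ih]
            · simp [pvPassB, pvRf, h1, h2, h3, h4, h5, ih]

theorem pvAbsl (qR qr qL ql : Nat) (l : List Char) :
    pvRf 'l' '0' (pvPassB qR qr qL ql l) = pvPassB qR qr qL (ql + 1) l := by
  induction l generalizing qR qr qL ql with
  | nil => simp [pvPassB, pvRf]
  | cons c cs ih =>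
    by_cases h1 : c = 'R'
    · subst h1
      cases qR with
      | zero => simp [pvPassB, pvRf, ih]
      | succ k => simp [pvPassB, pvRf, ih]
    · by_cases h2 : c = 'r'
      · subst h2
        cases qr with
        | zero => simp [pvPassB, pvRf, ih]
        | succ k => simp [pvPassB, pvRf, ih]
      · by_cases h3 : c = 'L'
        · subst h3
          cases qL with
          | zero => simp [pvPassB, pvRf, ih]
          | succ k => simp [pvPassB, pvRf, ih]
        · by_cases h4 : c = 'l'
          · subst h4
            cases ql with
            | zero => simp [pvPassB, pvRf, ih]
            | succ k => simp [pvPassB, pvRf, ih]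
          · by_cases h5 : c = ' '
            · subst h5; simp [pvPassB, pvRf, ih]
            · simp [pvPassB, pvRf, h1, h2, h3, h4, h5, ih]

theorem pvMapsp_rf (o n : Char) (ho1 : o ≠ ' ') (ho2 : o ≠ '\n') (hn : n ≠ ' ') (l : List Char) :
    pvRf o n (l.map pvSp) = (pvRf o n l).map pvSp := by
  induction l with
  | nil => rfl
  | cons c cs ih =>
    by_cases hc : c = o
    · subst hc
      simp [pvRf, pvSp, ho1, hn]
    · have hsp : pvSp c ≠ o := by
        simp only [pvSp]; split_ifs with h
        · exact Ne.symm ho2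
        · exact hc
      simp [pvRf, List.map, hsp, hc, ih]

theorem pvMapsp_body (fs : Char) (j : Int) (l : List Char) :
    pvListBody fs (l.map pvSp) j = (pvListBody fs l j).map pvSp := by
  simp only [pvListBody]
  split_ifs <;>
    simp [pvMapsp_rf 'L' '1' (by decide) (by decide) (by decide),
          pvMapsp_rf 'r' '0' (by decide) (by decide) (by decide),
          pvMapsp_rf 'R' '1' (by decide) (by decide) (by decide),
          pvMapsp_rf 'l' '0' (by decide) (by decide) (by decide)]

theorem pvBody_mk (fs : Char) (l : List Char) (j : Int) :
    unchainusLoopBody fs (String.ofList l) j = String.ofList (pvListBody fs l j) := by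
  by_cases hR : fs = 'R' <;> by_cases hL : fs = 'L' <;>
    simp [unchainusLoopBody, pvListBody, pvReplace1, hR, hL] <;>
      split_ifs <;> simp

theorem pvFold_mk (fs : Char) (r : List Int) (l : List Char) :
    r.foldl (unchainusLoopBody fs) (String.ofList l) = String.ofList (r.foldl (pvListBody fs) l) := by
  induction r generalizing l with
  | nil => rfl
  | cons j t ih => simp [List.foldl, pvBody_mk, ih]

theorem pvMapsp_fold (fs : Char) (r : List Int) (l : List Char) :
    r.foldl (pvListBody fs) (l.map pvSp) = (r.foldl (pvListBody fs) l).map pvSp := by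
  induction r generalizing l with
  | nil => rfl
  | cons j t ih => simp [List.foldl, pvMapsp_body, ih]

theorem pvLoopR (m : Nat) (qR qr qL ql : Nat) (l : List Char) :
    (PySem.List.pyRange 0 (m : Int) 1).foldl (pvListBody 'R') (pvPassB qR qr qL ql l)
      = pvPassB (qR + m / 2) (qr + (m + 1) / 2) (qL + (m + 1) / 2) (ql + m / 2) l := by
  induction m generalizing qR qr qL ql with
  | zero => simp [PySem.List.pyRange]
  | succ k ih =>
    have hcast : ((k + 1 : Nat) : Int) = (k : Int) + 1 := by push_cast; ring
    rw [hcast, PySem.List.pyRange_one_succ_right (by positivity), List.foldl_append]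
    rw [ih]
    simp only [List.foldl]
    have hm : PySem.Int.mod (k : Int) 2 = ((k % 2 : Nat) : Int) := by
      exact_mod_cast PySem.Int.mod_natCast k 2
    by_cases hp : k % 2 = 0
    · have h0 : PySem.Int.mod (k : Int) 2 = 0 := by omega
      have h1 : ¬ PySem.Int.mod (k : Int) 2 = 1 := by omega
      simp only [pvListBody, h0, h1]
      simp only [reduceIte, if_true, if_false, eq_self_iff_true, reduceCtorEq, Char.reduceEq,
                 ite_true, ite_false, one_ne_zero, zero_ne_one, not_false_iff]
      rw [pvAbsr, pvAbsL]
      have e1 : qL + (k + 1) / 2 + 1 = qL + (k + 1 + 1) / 2 := by omega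
      have e2 : qr + (k + 1) / 2 + 1 = qr + (k + 1 + 1) / 2 := by omega
      have e3 : qR + k / 2 = qR + (k + 1) / 2 := by omega
      have e4 : ql + k / 2 = ql + (k + 1) / 2 := by omega
      rw [e1, e2, e3, e4]
    · have h0 : ¬ PySem.Int.mod (k : Int) 2 = 0 := by omega
      have h1 : PySem.Int.mod (k : Int) 2 = 1 := by omega
      simp only [pvListBody, h0, h1]
      simp only [reduceIte, if_true, if_false, eq_self_iff_true, reduceCtorEq, Char.reduceEq,
                 ite_true, ite_false, one_ne_zero, zero_ne_one, not_false_iff]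
      rw [pvAbsl, pvAbsR]
      have e1 : qR + k / 2 + 1 = qR + (k + 1) / 2 := by omega
      have e2 : ql + k / 2 + 1 = ql + (k + 1) / 2 := by omega
      have e3 : qr + (k + 1) / 2 = qr + (k + 1 + 1) / 2 := by omega
      have e4 : qL + (k + 1) / 2 = qL + (k + 1 + 1) / 2 := by omega
      rw [e1, e2, e3, e4]

theorem pvLoopL (m : Nat) (qR qr qL ql : Nat) (l : List Char) :
    (PySem.List.pyRange 0 (m : Int) 1).foldl (pvListBody 'L') (pvPassB qR qr qL ql l)
      = pvPassB (qR + (m + 1) / 2) (qr + m / 2) (qL + m / 2) (ql + (m + 1) / 2) l := by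
  induction m generalizing qR qr qL ql with
  | zero => simp [PySem.List.pyRange]
  | succ k ih =>
    have hcast : ((k + 1 : Nat) : Int) = (k : Int) + 1 := by push_cast; ring
    rw [hcast, PySem.List.pyRange_one_succ_right (by positivity), List.foldl_append]
    rw [ih]
    simp only [List.foldl]
    have hm : PySem.Int.mod (k : Int) 2 = ((k % 2 : Nat) : Int) := by
      exact_mod_cast PySem.Int.mod_natCast k 2
    by_cases hp : k % 2 = 0
    · have h0 : PySem.Int.mod (k : Int) 2 = 0 := by omega
      have h1 : ¬ PySem.Int.mod (k : Int) 2 = 1 := by omega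
      simp only [pvListBody, h0, h1]
      simp only [reduceIte, if_true, if_false, eq_self_iff_true, reduceCtorEq, Char.reduceEq,
                 ite_true, ite_false, one_ne_zero, zero_ne_one, not_false_iff]
      rw [pvAbsl, pvAbsR]
      have e1 : qR + (k + 1) / 2 + 1 = qR + (k + 1 + 1) / 2 := by omega
      have e2 : ql + (k + 1) / 2 + 1 = ql + (k + 1 + 1) / 2 := by omega
      have e3 : qr + k / 2 = qr + (k + 1) / 2 := by omega
      have e4 : qL + k / 2 = qL + (k + 1) / 2 := by omega
      rw [e1, e2, e3, e4]
    · have h0 : ¬ PySem.Int.mod (k : Int) 2 = 0 := by omega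
      have h1 : PySem.Int.mod (k : Int) 2 = 1 := by omega
      simp only [pvListBody, h0, h1]
      simp only [reduceIte, if_true, if_false, eq_self_iff_true, reduceCtorEq, Char.reduceEq,
                 ite_true, ite_false, one_ne_zero, zero_ne_one, not_false_iff]
      rw [pvAbsr, pvAbsL]
      have e1 : qr + k / 2 + 1 = qr + (k + 1) / 2 := by omega
      have e2 : qL + k / 2 + 1 = qL + (k + 1) / 2 := by omega
      have e3 : qR + (k + 1) / 2 = qR + (k + 1 + 1) / 2 := by omega
      have e4 : ql + (k + 1) / 2 = ql + (k + 1 + 1) / 2 := by omega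
      rw [e1, e2, e3, e4]

theorem pvReplaceSpace (s : String) :
    PySem.Str.replace s " " "
" = String.ofList (s.toList.map pvSp) := by
  have h2 : (PySem.Str.replace s " " "
").toList = s.toList.map pvSp := by
    rw [PySem.Str.toList_replace s " " "
",
        show (" ").toList = [' '] from by decide,
        show ("
").toList = ['
'] from by decide, pvReplace_single]
    simp [pvSp]
  rw [← String.ofList_toList (s := PySem.Str.replace s " " "
"), h2]

theorem pvFloordivLen (l : List Char) :
    PySem.Int.floordiv ((l.length : Int)) 4 = ((l.length / 4 : Nat) : Int) := by
  exact_mod_cast PySem.Int.floordiv_natCast l.length 4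

-- ===== VERDICT (by name: the statement is the Claim_ definition above) =====
theorem unchainus_spec : Claim_equal_unchainus := by
  intro line hdom hpre
  unfold Spec_unchainus
  by_cases hR : PySem.Str.isIn "R" (PySem.Str.slice line none (some 4)) = true
  · by_cases hL : PySem.Str.isIn "L" (PySem.Str.slice line none (some 4)) = true
    · exact absurd ⟨hL, hR⟩ hpre
    · -- first step is 'R'
      have hfindL : PySem.Str.find (PySem.Str.slice line none (some 4)) "L" = -1 :=
        (PySem.Str.find_eq_neg_one_iff _ _).mpr
          (fun h => hL ((PySem.Str.isIn_iff_infix _ _).mpr h))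
      have hfindR : ¬ PySem.Str.find (PySem.Str.slice line none (some 4)) "R" = -1 :=
        fun h => ((PySem.Str.find_eq_neg_one_iff _ _).mp h)
          ((PySem.Str.isIn_iff_infix _ _).mp hR)
      have hfs : findFirstStep line = some 'R' := by
        simp only [findFirstStep]
        rw [if_neg hfindR, if_pos hfindL]
      have hflo : PySem.Int.floordiv (PySem.Str.len (pvReplace1 line 'R' '1')) 4
          = ((line.toList.length / 4 : Nat) : Int) := by
        rw [PySem.Str.len_eq, pvReplace1, String.toList_ofList, pvLen_rf, pvFloordivLen]
      simp only [unchainus, hfs, Char.reduceEq, reduceIte, if_true, if_false]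
      rw [hflo]
      rw [show pvReplace1 line 'R' '1' = String.ofList (pvRf 'R' '1' line.toList) from rfl]
      rw [pvFold_mk, pvReplaceSpace, String.toList_ofList, ← pvMapsp_fold,
          ← pvMapsp_rf 'R' '1' (by decide) (by decide) (by decide), ← pvPass_zero,
          pvAbsR, pvLoopR]
      simp only [unchainus_alt, hR]
      rw [show PySem.Str.isIn "L" (PySem.Str.slice line none (some 4)) = false from by
            simpa using hL]
      simp only [Bool.not_false, Bool.and_true, Bool.true_and, reduceIte,
                 PySem.Str.len_eq, pvFloordivLen, Int.toNat_natCast]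
      have e1 : 0 + 1 + line.toList.length / 4 / 2 = line.toList.length / 4 / 2 + 1 := by
        omega
      have e2 : 0 + (line.toList.length / 4 + 1) / 2
          = line.toList.length / 4 - line.toList.length / 4 / 2 := by omega
      have e3 : 0 + line.toList.length / 4 / 2 = line.toList.length / 4 / 2 := by omega
      rw [e1, e2, e3]
  · -- first step is 'L' (there is no 'R' among the first four characters)
    have hfindR : PySem.Str.find (PySem.Str.slice line none (some 4)) "R" = -1 :=
      (PySem.Str.find_eq_neg_one_iff _ _).mpr
        (fun h => hR ((PySem.Str.isIn_iff_infix _ _).mpr h))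
    have hfs : findFirstStep line = some 'L' := by
      simp only [findFirstStep]
      rw [if_pos hfindR]
    have hflo : PySem.Int.floordiv (PySem.Str.len (pvReplace1 line 'L' '1')) 4
        = ((line.toList.length / 4 : Nat) : Int) := by
      rw [PySem.Str.len_eq, pvReplace1, String.toList_ofList, pvLen_rf, pvFloordivLen]
    simp only [unchainus, hfs, Char.reduceEq, reduceIte, if_true, if_false]
    rw [hflo]
    rw [show pvReplace1 line 'L' '1' = String.ofList (pvRf 'L' '1' line.toList) from rfl]
    rw [pvFold_mk, pvReplaceSpace, String.toList_ofList, ← pvMapsp_fold,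
        ← pvMapsp_rf 'L' '1' (by decide) (by decide) (by decide), ← pvPass_zero,
        pvAbsL, pvLoopL]
    simp only [unchainus_alt]
    rw [show PySem.Str.isIn "R" (PySem.Str.slice line none (some 4)) = false from by
          simpa using hR]
    simp only [Bool.false_and, Bool.false_eq_true, if_false, reduceIte, Char.reduceEq,
               PySem.Str.len_eq, pvFloordivLen, Int.toNat_natCast]
    have e1 : 0 + (line.toList.length / 4 + 1) / 2
        = line.toList.length / 4 - line.toList.length / 4 / 2 := by omega
    have e2 : 0 + line.toList.length / 4 / 2 = line.toList.length / 4 / 2 := by omega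
    have e3 : 0 + 1 + line.toList.length / 4 / 2 = line.toList.length / 4 / 2 + 1 := by
      omega
    rw [e1, e2, e3]
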